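-- pv_equiv track=rewrite | github.com/theodwyatt/Sample-Repo | CS_112/Programming_Assignments/Assignment3/twyatt5_210_PA3.py | lifespan
-- ===== SOURCE A (Python) =====
-- def lifespan(fingers_list, num_toes):
--     digit = 1
--     life_count = 0
--     #for loop for iterating over list
--     for num in fingers_list:
--         #while loop for iterating over numbers up to digit from
--         #list
--         while digit <= num:
--             #if statement to filter out for the correct digits
--             #to figure lifespan of Habugabuped
--             if (digit % num_toes == 0)and (digit != 0):
--                 life_count += 1
--                 digit +=1
--                 if digit > num:
--                     digit = 0
--                     break
--             elif digit == num:
--                 digit = 0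
--                 break
--             elif num < num_toes:
--                 digit = 0
--                 break
--             else:
--                 digit +=1
--     return(life_count)
-- ===== SOURCE B (Python) =====
-- def lifespan(fingers_list, num_toes):
--     step = abs(num_toes)
--     return sum(n // step for n in fingers_list if n > 0)
-- ===== Notes on version B (the rewrite author's own statement) =====
-- stated objective: faster
-- what changed: Replaces the per-value counting while-loop (one iteration per integer up to each list element) with the closed-form floor division n // |num_toes| summed over the positive elements in one pass.
import Mathlib
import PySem

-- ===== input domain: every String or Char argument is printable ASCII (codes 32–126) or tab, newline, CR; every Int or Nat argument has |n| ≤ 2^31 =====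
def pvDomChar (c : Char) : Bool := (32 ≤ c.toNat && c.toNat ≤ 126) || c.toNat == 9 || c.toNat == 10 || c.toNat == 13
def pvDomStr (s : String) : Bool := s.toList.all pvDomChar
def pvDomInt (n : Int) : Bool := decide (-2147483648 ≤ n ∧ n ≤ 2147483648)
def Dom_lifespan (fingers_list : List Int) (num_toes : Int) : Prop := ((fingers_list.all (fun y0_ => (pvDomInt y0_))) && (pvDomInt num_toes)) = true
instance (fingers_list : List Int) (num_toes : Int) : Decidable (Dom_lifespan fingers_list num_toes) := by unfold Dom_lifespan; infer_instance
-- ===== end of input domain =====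

-- B replaces A's per-value counting while-loop with the closed form n // |num_toes| summed over positive elements (asymptotically faster).


-- ===== PORT A =====
-- the inner `while digit <= num` loop of A; returns (digit, life_count) after the loop.
-- The Nat argument is fuel, a pure totality guard: it is passed as (num + 1 - digit).toNat,
-- which exceeds the number of iterations the Python loop performs, so the 0 case is never hit
-- while the loop condition holds.
def lifespanWhile (num num_toes digit life : Int) : Nat → Int × Int
  | 0 => (digit, life)
  | fuel + 1 =>
    if digit ≤ num then
      if PySem.Int.mod digit num_toes = 0 ∧ digit ≠ 0 then
        if digit + 1 > num then (0, life + 1)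
        else lifespanWhile num num_toes (digit + 1) (life + 1) fuel
      else if digit = num then (0, life)
      else if num < num_toes then (0, life)
      else lifespanWhile num num_toes (digit + 1) life fuel
    else (digit, life)

def lifespan (fingers_list : List Int) (num_toes : Int) : Int :=
  (fingers_list.foldl
    (fun st num => lifespanWhile num num_toes st.1 st.2 (num + 1 - st.1).toNat) (1, 0)).2

-- ===== PORT B =====
def lifespan_alt (fingers_list : List Int) (num_toes : Int) : Int :=
  (fingers_list.filter (fun n => decide (0 < n))).foldl
    (fun acc n => acc + PySem.Int.floordiv n |num_toes|) 0

-- ===== PRECONDITION & SPEC =====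
-- A raises ZeroDivisionError exactly when num_toes = 0 and some element is ≥ 1; Pre_ excludes exactly those inputs (B raises there too).
def Pre_lifespan (fingers_list : List Int) (num_toes : Int) : Prop :=
  num_toes ≠ 0 ∨ ∀ n ∈ fingers_list, n ≤ 0
instance (fingers_list : List Int) (num_toes : Int) : Decidable (Pre_lifespan fingers_list num_toes) := by unfold Pre_lifespan; infer_instance
def pvWitness_lifespan : List Int × Int := ([10, 3, -2, 4], 4)

def Spec_lifespan (fingers_list : List Int) (num_toes : Int) (out : Int) : Prop := out = lifespan_alt fingers_list num_toes
instance (fingers_list : List Int) (num_toes : Int) (out : Int) : Decidable (Spec_lifespan fingers_list num_toes out) := by unfold Spec_lifespan; infer_instance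

-- ===== CLAIM (what is proved, stated in full; the proofs are below) =====
def Claim_equal_lifespan : Prop := ∀ (fingers_list : List Int) (num_toes : Int), Dom_lifespan fingers_list num_toes → Pre_lifespan fingers_list num_toes → Spec_lifespan fingers_list num_toes (lifespan fingers_list num_toes)

-- ===== LEMMAS AND PROOFS =====

-- per-element contribution
def lifespanG (t num : Int) : Int := if 0 < num then PySem.Int.floordiv num |t| else 0

lemma ediv_pred (k d : Int) (hk : 0 < k) :
    d / k = (d - 1) / k + (if k ∣ d then 1 else 0) := by
  have h := Int.mul_ediv_add_emod (d - 1) k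
  have hr0 := Int.emod_nonneg (d - 1) (by omega : k ≠ 0)
  have hr1 := Int.emod_lt_of_pos (d - 1) hk
  set q := (d - 1) / k with hq
  set r := (d - 1) % k with hr
  by_cases hc : r + 1 = k
  · have hd : d = k * (q + 1) := by
      have hmul : k * (q + 1) = k * q + k := by ring
      omega
    have hdvd : k ∣ d := ⟨q + 1, hd⟩
    rw [if_pos hdvd, hd, Int.mul_ediv_cancel_left _ (by omega : k ≠ 0)]
  · have hd : d = (r + 1) + k * q := by omega
    have hdiv : d / k = q := by
      rw [hd, Int.add_mul_ediv_left _ _ (by omega : k ≠ 0),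
        Int.ediv_eq_zero_of_lt (by omega) (by omega)]
      omega
    have hnd : ¬ k ∣ d := by
      intro hdvd
      have : d % k = 0 := Int.emod_eq_zero_of_dvd hdvd
      have hmod : d % k = r + 1 := by
        rw [hd, Int.add_mul_emod_self_left, Int.emod_eq_of_lt (by omega) (by omega)]
      omega
    rw [if_neg hnd, hdiv]
    omega

lemma lifespanWhile_mid (t : Int) (ht : t ≠ 0) :
    ∀ (fuel : Nat) (d num life : Int), 1 ≤ d → d ≤ num → (num + 1 - d).toNat ≤ fuel →
      lifespanWhile num t d life fuel = (0, life + (num / |t| - (d - 1) / |t|)) := by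
  have hk : 0 < |t| := abs_pos.2 ht
  have hdvd_iff : ∀ a : Int, PySem.Int.mod a t = 0 ↔ |t| ∣ a := by
    intro a
    rw [PySem.Int.mod_eq_zero_iff_dvd, abs_dvd]
  intro fuel
  induction fuel with
  | zero => intro d num life h1 h2 hf; omega
  | succ fuel ih =>
    intro d num life h1 h2 hf
    simp only [lifespanWhile, if_pos h2]
    by_cases hm : PySem.Int.mod d t = 0 ∧ d ≠ 0
    · have hdvd : |t| ∣ d := (hdvd_iff d).1 hm.1
      have hpd := ediv_pred |t| d hk
      rw [if_pos hdvd] at hpd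
      rw [if_pos hm]
      by_cases hgt : d + 1 > num
      · have hdn : d = num := by omega
        rw [if_pos hgt, Prod.mk.injEq]
        subst hdn
        exact ⟨rfl, by linarith⟩
      · rw [if_neg hgt, ih (d + 1) num (life + 1) (by omega) (by omega) (by omega),
          Prod.mk.injEq]
        have : d + 1 - 1 = d := by omega
        rw [this]
        exact ⟨rfl, by linarith⟩
    · have hnd : ¬ |t| ∣ d := by
        intro hdvd
        exact hm ⟨(hdvd_iff d).2 hdvd, by omega⟩
      have hpd := ediv_pred |t| d hk
      rw [if_neg hnd] at hpd
      rw [if_neg hm]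
      by_cases heq : d = num
      · rw [if_pos heq, Prod.mk.injEq]
        subst heq
        exact ⟨rfl, by linarith⟩
      · rw [if_neg heq]
        by_cases hlt : num < t
        · have htk : |t| = t := abs_of_pos (by omega)
          have h0 : num / |t| = 0 := Int.ediv_eq_zero_of_lt (by omega) (by omega)
          have h0' : (d - 1) / |t| = 0 := Int.ediv_eq_zero_of_lt (by omega) (by omega)
          rw [if_pos hlt, Prod.mk.injEq]
          exact ⟨rfl, by omega⟩
        · rw [if_neg hlt, ih (d + 1) num life (by omega) (by omega) (by omega),
            Prod.mk.injEq]
          have : d + 1 - 1 = d := by omega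
          rw [this]
          exact ⟨rfl, by linarith⟩

lemma lifespanWhile_one (t : Int) (ht : t ≠ 0) (num life : Int) :
    lifespanWhile num t 1 life num.toNat = ((if 1 ≤ num then 0 else 1), life + lifespanG t num) := by
  have hk : 0 < |t| := abs_pos.2 ht
  by_cases h : (1 : Int) ≤ num
  · rw [lifespanWhile_mid t ht num.toNat 1 num life le_rfl h (by omega), if_pos h]
    unfold lifespanG
    rw [if_pos (by omega : (0:Int) < num), PySem.Int.floordiv_eq_ediv_of_pos hk]
    norm_num
  · have hz : num.toNat = 0 := by omega
    rw [hz]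
    simp only [lifespanWhile, if_neg h]
    unfold lifespanG
    rw [if_neg (by omega : ¬ (0:Int) < num), add_zero]

lemma lifespanWhile_zero (t : Int) (ht : t ≠ 0) (num life : Int) :
    lifespanWhile num t 0 life (num + 1).toNat = (0, life + lifespanG t num) := by
  have hk : 0 < |t| := abs_pos.2 ht
  by_cases h : (0 : Int) ≤ num
  · obtain ⟨fuel, hfuel⟩ : ∃ fuel, (num + 1).toNat = fuel + 1 := ⟨num.toNat, by omega⟩
    rw [hfuel]
    simp only [lifespanWhile, if_pos h,
      if_neg (by simp : ¬ (PySem.Int.mod 0 t = 0 ∧ (0:Int) ≠ 0))]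
    by_cases heq : (0 : Int) = num
    · rw [if_pos heq]
      unfold lifespanG
      rw [if_neg (by omega : ¬ (0:Int) < num), add_zero]
    · rw [if_neg heq]
      by_cases hlt : num < t
      · have htk : |t| = t := abs_of_pos (by omega)
        rw [if_pos hlt]
        unfold lifespanG
        rw [if_pos (by omega : (0:Int) < num), PySem.Int.floordiv_eq_ediv_of_pos hk,
          Int.ediv_eq_zero_of_lt (by omega) (by omega), add_zero]
      · rw [if_neg hlt]
        rw [show (0:Int) + 1 = 1 by norm_num,
          lifespanWhile_mid t ht fuel 1 num life le_rfl (by omega) (by omega)]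
        unfold lifespanG
        rw [if_pos (by omega : (0:Int) < num), PySem.Int.floordiv_eq_ediv_of_pos hk]
        norm_num
  · have hz : (num + 1).toNat = 0 := by omega
    rw [hz]
    simp only [lifespanWhile]
    unfold lifespanG
    rw [if_neg (by omega : ¬ (0:Int) < num), add_zero]

lemma lifespan_foldl_inv (t : Int) (ht : t ≠ 0) :
    ∀ (fl : List Int) (d life : Int), (d = 0 ∨ d = 1) →
      (fl.foldl (fun st num => lifespanWhile num t st.1 st.2 (num + 1 - st.1).toNat) (d, life)).2
        = life + (fl.map (lifespanG t)).sum := by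
  intro fl
  induction fl with
  | nil => intro d life _; simp
  | cons num rest ih =>
    intro d life hd
    simp only [List.foldl_cons, List.map_cons, List.sum_cons]
    rcases hd with h0 | h1
    · subst h0
      have he : (num + 1 - (0:Int)).toNat = (num + 1).toNat := by omega
      simp only [he]
      rw [lifespanWhile_zero t ht num life, ih 0 (life + lifespanG t num) (Or.inl rfl)]
      ring
    · subst h1
      have he : (num + 1 - (1:Int)).toNat = num.toNat := by omega
      simp only [he]
      rw [lifespanWhile_one t ht num life]
      by_cases h : (1 : Int) ≤ num
      · rw [if_pos h, ih 0 (life + lifespanG t num) (Or.inl rfl)]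
        ring
      · rw [if_neg h, ih 1 (life + lifespanG t num) (Or.inr rfl)]
        ring

lemma lifespan_alt_sum (t : Int) :
    ∀ (fl : List Int) (acc : Int),
      (fl.filter (fun n => decide (0 < n))).foldl (fun a n => a + PySem.Int.floordiv n |t|) acc
        = acc + (fl.map (lifespanG t)).sum := by
  intro fl
  induction fl with
  | nil => intro acc; simp
  | cons n rest ih =>
    intro acc
    simp only [List.filter_cons, List.map_cons, List.sum_cons]
    by_cases h : (0 : Int) < n
    · rw [if_pos (by simpa using h), List.foldl_cons, ih]
      unfold lifespanG
      rw [if_pos h]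
      ring
    · rw [if_neg (by simpa using h), ih]
      unfold lifespanG
      rw [if_neg h]
      ring

lemma lifespan_nonpos (t : Int) :
    ∀ (fl : List Int) (life : Int), (∀ n ∈ fl, n ≤ 0) →
      (fl.foldl (fun st num => lifespanWhile num t st.1 st.2 (num + 1 - st.1).toNat) (1, life)).2
        = life := by
  intro fl
  induction fl with
  | nil => intro life _; simp
  | cons num rest ih =>
    intro life h
    have hnum := h num (List.mem_cons_self ..)
    simp only [List.foldl_cons]
    have he : (num + 1 - (1:Int)).toNat = 0 := by omega
    simp only [he, lifespanWhile]
    exact ih life (fun n hn => h n (List.mem_cons_of_mem _ hn))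

-- ===== VERDICT (by name: the statement is the Claim_ definition above) =====
theorem lifespan_spec : Claim_equal_lifespan := by
  intro fl t _ hpre
  unfold Spec_lifespan lifespan lifespan_alt
  rcases hpre with ht | hnp
  · rw [lifespan_foldl_inv t ht fl 1 0 (Or.inr rfl), lifespan_alt_sum t fl 0]
  · by_cases ht : t = 0
    · rw [lifespan_nonpos t fl 0 hnp]
      have : fl.filter (fun n => decide (0 < n)) = [] := by
        rw [List.filter_eq_nil_iff]
        intro n hn
        simpa using not_lt.2 (hnp n hn)
      rw [this]; rfl
    · rw [lifespan_foldl_inv t ht fl 1 0 (Or.inr rfl), lifespan_alt_sum t fl 0]
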